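-- pv_equiv track=rewrite | github.com/mrjabka/-9- | Графы/Ещё задачи на виды представления графов/D. Истоки и стоки.py | find_sources_and_sinks
-- ===== SOURCE A (Python) =====
-- def find_sources_and_sinks(n, adjacency_matrix):
--
--     sources = []
--     sinks = []
--
--     for i in range(n):
--         in_degree = 0
--         out_degree = 0
--
--         for j in range(n):
--             if adjacency_matrix[j][i] == 1:
--                 in_degree += 1
--             if adjacency_matrix[i][j] == 1:
--                 out_degree += 1
--
--         if in_degree == 0:
--             sources.append(i + 1)
--         if out_degree == 0:
--             sinks.append(i + 1)
--
--     return sources, sinks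
-- ===== SOURCE B (Python) =====
-- def find_sources_and_sinks(n, adjacency_matrix):
--     # One pass over the rows: count each row's out-degree and accumulate
--     # in-degrees into an array, then read sources off the accumulator.
--     in_deg = [0] * n
--     sinks = []
--     for i in range(n):
--         row = adjacency_matrix[i]
--         out_degree = 0
--         for j in range(n):
--             if row[j] == 1:
--                 in_deg[j] += 1
--                 out_degree += 1
--         if out_degree == 0:
--             sinks.append(i + 1)
--     sources = [i + 1 for i in range(n) if in_deg[i] == 0]
--     return sources, sinks
-- ===== Notes on version B (the rewrite author's own statement) =====
-- stated objective: alternative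
-- what changed: Instead of recomputing the column (in-degree) count for every vertex with a second inner scan, B makes a single pass over the rows, counting each row's out-degree while accumulating all in-degrees into one array, then reads the sources off that array; each matrix entry is read once instead of twice.
import Mathlib
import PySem

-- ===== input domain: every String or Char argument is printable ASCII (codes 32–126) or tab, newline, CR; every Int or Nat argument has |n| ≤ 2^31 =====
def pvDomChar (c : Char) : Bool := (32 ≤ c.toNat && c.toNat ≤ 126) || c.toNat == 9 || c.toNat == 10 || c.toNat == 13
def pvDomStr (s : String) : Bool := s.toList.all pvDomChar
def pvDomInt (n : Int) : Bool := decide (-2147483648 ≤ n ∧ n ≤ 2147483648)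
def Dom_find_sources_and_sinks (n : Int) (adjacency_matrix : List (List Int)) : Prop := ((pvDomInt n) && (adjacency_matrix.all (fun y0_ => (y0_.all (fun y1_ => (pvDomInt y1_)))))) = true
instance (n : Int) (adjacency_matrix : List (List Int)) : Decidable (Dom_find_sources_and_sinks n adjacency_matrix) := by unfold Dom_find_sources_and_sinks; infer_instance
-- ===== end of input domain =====

-- B replaces A's per-vertex column rescan by a single row pass accumulating all in-degrees into
-- one array (each matrix entry is read once instead of twice); same O(n^2) asymptotics.


-- ===== PORT A =====
def find_sources_and_sinks (n : Int) (adjacency_matrix : List (List Int)) : List Int × List Int :=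
  (PySem.List.pyRange 0 n 1).foldl (fun (st : List Int × List Int) i =>
    let deg := (PySem.List.pyRange 0 n 1).foldl (fun (d : Int × Int) j =>
      let d := if PySem.List.pyGetD (PySem.List.pyGetD adjacency_matrix j []) i 0 == 1 then
                 (d.1 + 1, d.2) else d
      if PySem.List.pyGetD (PySem.List.pyGetD adjacency_matrix i []) j 0 == 1 then
        (d.1, d.2 + 1) else d) (0, 0)
    let st := if deg.1 == 0 then (st.1 ++ [i + 1], st.2) else st
    if deg.2 == 0 then (st.1, st.2 ++ [i + 1]) else st) ([], [])

-- ===== PORT B =====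
def find_sources_and_sinks_alt (n : Int) (adjacency_matrix : List (List Int)) : List Int × List Int :=
  let fin := (PySem.List.pyRange 0 n 1).foldl (fun (st : List Int × List Int) i =>
      let row := PySem.List.pyGetD adjacency_matrix i []
      let inner := (PySem.List.pyRange 0 n 1).foldl (fun (p : List Int × Int) j =>
          if PySem.List.pyGetD row j 0 == 1 then
            (PySem.List.pySetD p.1 j (PySem.List.pyGetD p.1 j 0 + 1), p.2 + 1)
          else p) (st.1, 0)
      if inner.2 == 0 then (inner.1, st.2 ++ [i + 1]) else (inner.1, st.2))
    (PySem.List.pyRepeat [(0 : Int)] n, [])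
  let sources := (PySem.List.pyRange 0 n 1).foldl (fun (acc : List Int) i =>
      if PySem.List.pyGetD fin.1 i 0 == 0 then acc ++ [i + 1] else acc) []
  (sources, fin.2)

-- ===== PRECONDITION & SPEC =====
-- Pre_ excludes exactly the inputs where Python A raises IndexError: n exceeding the number of
-- rows, or one of the first n rows shorter than n (the B Python raises on exactly those too).
def Pre_find_sources_and_sinks (n : Int) (adjacency_matrix : List (List Int)) : Prop :=
  n ≤ (adjacency_matrix.length : Int) ∧
  ∀ row ∈ adjacency_matrix.take n.toNat, n ≤ (row.length : Int)
instance (n : Int) (adjacency_matrix : List (List Int)) : Decidable (Pre_find_sources_and_sinks n adjacency_matrix) := by unfold Pre_find_sources_and_sinks; infer_instance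
def pvWitness_find_sources_and_sinks : Int × List (List Int) := (2, [[0, 1], [0, 0]])

def Spec_find_sources_and_sinks (n : Int) (adjacency_matrix : List (List Int)) (out : List Int × List Int) : Prop := out = find_sources_and_sinks_alt n adjacency_matrix
instance (n : Int) (adjacency_matrix : List (List Int)) (out : List Int × List Int) : Decidable (Spec_find_sources_and_sinks n adjacency_matrix out) := by unfold Spec_find_sources_and_sinks; infer_instance

-- ===== CLAIM (what is proved, stated in full; the proofs are below) =====
def Claim_equal_find_sources_and_sinks : Prop := ∀ (n : Int) (adjacency_matrix : List (List Int)), Dom_find_sources_and_sinks n adjacency_matrix → Pre_find_sources_and_sinks n adjacency_matrix → Spec_find_sources_and_sinks n adjacency_matrix (find_sources_and_sinks n adjacency_matrix)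

-- ===== LEMMAS AND PROOFS =====

-- the entry test both programs apply: is adjacency_matrix[i][j] equal to 1 (totalised by pyGetD)
def pvQ (m : List (List Int)) (i j : Int) : Bool :=
  PySem.List.pyGetD (PySem.List.pyGetD m i []) j 0 == 1

-- A's inner loop: two independent counters over the column and the row of vertex i
lemma innerA (m : List (List Int)) (i : Int) (J : List Int) (d : Int × Int) :
    J.foldl (fun (d : Int × Int) j =>
      let d := if PySem.List.pyGetD (PySem.List.pyGetD m j []) i 0 == 1 then (d.1 + 1, d.2) else d
      if PySem.List.pyGetD (PySem.List.pyGetD m i []) j 0 == 1 then (d.1, d.2 + 1) else d) d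
    = (d.1 + (J.countP (fun j => pvQ m j i) : Int), d.2 + (J.countP (fun j => pvQ m i j) : Int)) := by
  induction J generalizing d with
  | nil => simp
  | cons j J ih =>
    simp only [List.foldl_cons, List.countP_cons, ih, pvQ]
    split_ifs <;> simp_all <;> omega

-- A's outer loop: two independent filtered appends
lemma outerA (p q : Int → Bool) (I : List Int) (s t : List Int) :
    I.foldl (fun (st : List Int × List Int) i =>
      let st := if p i then (st.1 ++ [i + 1], st.2) else st
      if q i then (st.1, st.2 ++ [i + 1]) else st) (s, t)
    = (s ++ (I.filter p).map (· + 1), t ++ (I.filter q).map (· + 1)) := by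
  induction I generalizing s t with
  | nil => simp
  | cons i I ih =>
    simp only [List.foldl_cons, List.filter_cons]
    split_ifs <;> simp_all

-- A as a pair of filters over range(n)
lemma A_char (n : Int) (m : List (List Int)) :
    find_sources_and_sinks n m =
      (((PySem.List.pyRange 0 n 1).filter
          (fun i => ((PySem.List.pyRange 0 n 1).countP (fun j => pvQ m j i) : Int) == 0)).map (· + 1),
       ((PySem.List.pyRange 0 n 1).filter
          (fun i => ((PySem.List.pyRange 0 n 1).countP (fun j => pvQ m i j) : Int) == 0)).map (· + 1)) := by
  unfold find_sources_and_sinks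
  simp only [innerA, zero_add]
  exact outerA _ _ _ _ _

-- B's in-degree accumulator updated along row i
def pvVecA (m : List (List Int)) (i : Int) (J : List Int) (v : List Int) : List Int :=
  J.foldl (fun v j => if pvQ m i j then PySem.List.pySetD v j (PySem.List.pyGetD v j 0 + 1) else v) v

-- B's inner loop: the accumulator update and the out-degree counter are independent
lemma innerB (m : List (List Int)) (i : Int) (J : List Int) (v : List Int) (a : Int) :
    J.foldl (fun (p : List Int × Int) j =>
      if PySem.List.pyGetD (PySem.List.pyGetD m i []) j 0 == 1 then
        (PySem.List.pySetD p.1 j (PySem.List.pyGetD p.1 j 0 + 1), p.2 + 1)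
      else p) (v, a)
    = (pvVecA m i J v, a + (J.countP (fun j => pvQ m i j) : Int)) := by
  induction J generalizing v a with
  | nil => simp [pvVecA]
  | cons j J ih =>
    simp only [List.foldl_cons, List.countP_cons, pvVecA, pvQ] at *
    split_ifs with h <;> simp_all
    omega

-- B's outer loop: the accumulator fold and the sinks list are independent
lemma outerB (g : List Int → Int → List Int) (q : Int → Bool) (I : List Int) (v s : List Int) :
    I.foldl (fun (st : List Int × List Int) i =>
      if q i then (g st.1 i, st.2 ++ [i + 1]) else (g st.1 i, st.2)) (v, s)
    = (I.foldl g v, s ++ (I.filter q).map (· + 1)) := by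
  induction I generalizing v s with
  | nil => simp
  | cons i I ih =>
    simp only [List.foldl_cons, List.filter_cons]
    split_ifs <;> simp_all

-- B as a filter over the final accumulator plus the same sinks filter as A
lemma B_char (n : Int) (m : List (List Int)) :
    find_sources_and_sinks_alt n m =
      (((PySem.List.pyRange 0 n 1).filter
          (fun i => PySem.List.pyGetD
            ((PySem.List.pyRange 0 n 1).foldl (fun v i => pvVecA m i (PySem.List.pyRange 0 n 1) v)
              (List.replicate n.toNat 0)) i 0 == 0)).map (· + 1),
       ((PySem.List.pyRange 0 n 1).filter
          (fun i => ((PySem.List.pyRange 0 n 1).countP (fun j => pvQ m i j) : Int) == 0)).map (· + 1)) := by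
  unfold find_sources_and_sinks_alt
  simp only [innerB, zero_add, PySem.List.pyRepeat_singleton, PySem.List.foldl_append_if]
  rw [outerB (fun v i => pvVecA m i (PySem.List.pyRange 0 n 1) v)]
  simp

lemma pvVecA_len (m : List (List Int)) (i : Int) (J : List Int) :
    ∀ v : List Int, (pvVecA m i J v).length = v.length := by
  induction J with
  | nil => intro v; rfl
  | cons j J ih =>
    intro v
    simp only [pvVecA, List.foldl_cons] at *
    split_ifs with h
    · rw [ih]; simp [PySem.List.length_pySetD]
    · exact ih v

lemma countP_beq_and (c : Int → Bool) (t : Int) (L : List Int) :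
    L.countP (fun j => j == t && c j) = if c t then L.count t else 0 := by
  induction L with
  | nil => simp
  | cons j L ih =>
    simp only [List.countP_cons, List.count_cons, ih]
    by_cases h : j = t
    · subst h; cases hc : c j <;> simp
    · simp [h]

-- one accumulator update touches slot t exactly when entry (i, t) is 1 (all indices in range)
lemma pvVecA_get (m : List (List Int)) (i : Int) (J : List Int) :
    ∀ (v : List Int) (t : Int), 0 ≤ t → t < (v.length : Int) →
      (∀ j ∈ J, 0 ≤ j ∧ j < (v.length : Int)) →
      PySem.List.pyGetD (pvVecA m i J v) t 0
        = PySem.List.pyGetD v t 0 + (J.countP (fun j => j == t && pvQ m i j) : Int) := by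
  induction J with
  | nil => intro v t _ _ _; simp [pvVecA]
  | cons j J ih =>
    intro v t ht htl hJ
    obtain ⟨hj0, hjl⟩ := hJ j (by simp)
    simp only [pvVecA, List.foldl_cons, List.countP_cons] at *
    rw [PySem.List.pyGetD_eq_getElem v 0 ht htl, PySem.List.pyGetD_eq_getElem v 0 hj0 hjl]
    by_cases h : pvQ m i j
    · rw [if_pos h]
      have hlen : (PySem.List.pySetD v j (v[j.toNat]'(by omega) + 1)).length = v.length :=
        PySem.List.length_pySetD v j _
      rw [ih _ t ht (by omega) (fun x hx => by rw [hlen]; exact hJ x (by simp [hx]))]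
      rw [PySem.List.pySetD_of_nonneg v _ hj0,
          PySem.List.pyGetD_eq_getElem _ 0 ht (by simpa using htl),
          List.getElem_set]
      by_cases hjt : j = t
      · subst hjt
        simp only [BEq.rfl, Bool.true_and, h, if_pos]
        push_cast
        omega
      · have hne : ¬ (j.toNat = t.toNat) := by omega
        have hbe : (j == t) = false := by simp [hjt]
        simp only [hne, if_false, hbe, Bool.false_and]
        push_cast
        omega
    · rw [if_neg h]
      rw [ih _ t ht htl (fun x hx => hJ x (by simp [hx])),
          PySem.List.pyGetD_eq_getElem v 0 ht htl]
      simp [h]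

lemma pvVec_get (m : List (List Int)) (n i : Int) (v : List Int) (t : Int)
    (hlen : v.length = n.toNat) (ht : 0 ≤ t) (htn : t < n) :
    PySem.List.pyGetD (pvVecA m i (PySem.List.pyRange 0 n 1) v) t 0
      = PySem.List.pyGetD v t 0 + (if pvQ m i t then 1 else 0) := by
  rw [pvVecA_get m i _ v t ht (by omega)
      (fun j hj => by rw [PySem.List.mem_pyRange_one] at hj; omega)]
  rw [countP_beq_and (fun j => pvQ m i j) t,
      List.count_eq_one_of_mem (PySem.List.nodup_pyRange_one 0 n)
        (PySem.List.mem_pyRange_one.mpr ⟨ht, htn⟩)]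
  split_ifs <;> simp

-- the invariant: after the full row pass, slot t holds the in-degree (A's column count) of t
lemma Vfold_get (m : List (List Int)) (n : Int) (I : List Int) :
    ∀ (v : List Int), v.length = n.toNat → ∀ t : Int, 0 ≤ t → t < n →
      PySem.List.pyGetD (I.foldl (fun v i => pvVecA m i (PySem.List.pyRange 0 n 1) v) v) t 0
        = PySem.List.pyGetD v t 0 + (I.countP (fun i => pvQ m i t) : Int) := by
  induction I with
  | nil => intro v _ t _ _; simp
  | cons i I ih =>
    intro v hv t ht htn
    simp only [List.foldl_cons, List.countP_cons]
    rw [ih _ (by rw [pvVecA_len]; exact hv) t ht htn, pvVec_get m n i v t hv ht htn]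
    split_ifs <;> push_cast <;> omega

theorem main_eq (n : Int) (m : List (List Int)) :
    find_sources_and_sinks n m = find_sources_and_sinks_alt n m := by
  rw [A_char, B_char]
  refine congrArg₂ Prod.mk ?_ rfl
  refine congrArg _ (List.filter_congr ?_)
  intro i hi
  rw [PySem.List.mem_pyRange_one] at hi
  rw [Vfold_get m n _ _ (by simp) i hi.1 hi.2]
  have : PySem.List.pyGetD (List.replicate n.toNat (0 : Int)) i 0 = 0 := by
    rw [PySem.List.pyGetD_eq_getElem _ 0 hi.1 (by simp; omega)]
    simp
  rw [this, zero_add]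

-- ===== VERDICT (by name: the statement is the Claim_ definition above) =====
theorem find_sources_and_sinks_spec : Claim_equal_find_sources_and_sinks := by
  intro n m _ _
  unfold Spec_find_sources_and_sinks
  exact main_eq n m
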